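-- pv_equiv track=rewrite | github.com/Th3GaM3RCaT/SpecsNet | security_config.py | is_ip_allowed
-- ===== SOURCE A (Python) =====
-- import ipaddress
--
-- ALLOWED_SUBNETS = [
--     "10.100.0.0/16",
--     "10.101.0.0/16",
--     "10.102.0.0/16",
--     "10.103.0.0/16",
--     "10.104.0.0/16",
--     "10.105.0.0/16",
--     "10.106.0.0/16",
--     "10.107.0.0/16",
--     "10.108.0.0/16",
--     "10.109.0.0/16",
--     "10.110.0.0/16",
--     "10.111.0.0/16",
--     "10.112.0.0/16",
--     "10.113.0.0/16",
--     "10.114.0.0/16",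
--     "10.115.0.0/16",
--     "10.116.0.0/16",
--     "10.117.0.0/16",
--     "10.118.0.0/16",
--     "10.119.0.0/16",
--     "127.0.0.1/32",  # localhost para testing
-- ]
--
-- def is_ip_allowed(ip: str) -> bool:
--     """Verifica si una IP está en la whitelist de subnets.
--
--     Args:
--         ip (str): Dirección IP a verificar
--
--     Returns:
--         bool: True si la IP está permitida
--     """
--     try:
--         ip_obj = ipaddress.ip_address(ip)
--
--         for subnet_str in ALLOWED_SUBNETS:
--             subnet = ipaddress.ip_network(subnet_str)
--             if ip_obj in subnet:
--                 return True
--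
--         return False
--     except ValueError:
--         # IP inválida
--         return False
-- ===== SOURCE B (Python) =====
-- import re
--
-- _OCTET = r"(25[0-5]|2[0-4][0-9]|1[0-9][0-9]|[1-9]?[0-9])"
-- _IPV4_RE = re.compile(rf"{_OCTET}\.{_OCTET}\.{_OCTET}\.{_OCTET}")
--
-- def is_ip_allowed(ip: str) -> bool:
--     """Verifica si una IP esta en la whitelist: 10.100.0.0-10.119.255.255 o localhost."""
--     m = _IPV4_RE.fullmatch(ip)
--     if m is None:
--         return False
--     a, b, c, d = (int(g) for g in m.groups())
--     n = ((a * 256 + b) * 256 + c) * 256 + d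
--     return 0x0A640000 <= n <= 0x0A77FFFF or n == 0x7F000001
-- ===== Notes on version B (the rewrite author's own statement) =====
-- stated objective: simpler
-- what changed: Replaces the loop over 21 subnet strings (re-parsing each ip_network on every call) with one precompiled IPv4 regex fullmatch and a single closed-form integer range test: the 20 /16 subnets 10.100-10.119 form one contiguous block, so membership is 0x0A640000 <= n <= 0x0A77FFFF, plus n == 0x7F000001 for localhost.
import Mathlib
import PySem

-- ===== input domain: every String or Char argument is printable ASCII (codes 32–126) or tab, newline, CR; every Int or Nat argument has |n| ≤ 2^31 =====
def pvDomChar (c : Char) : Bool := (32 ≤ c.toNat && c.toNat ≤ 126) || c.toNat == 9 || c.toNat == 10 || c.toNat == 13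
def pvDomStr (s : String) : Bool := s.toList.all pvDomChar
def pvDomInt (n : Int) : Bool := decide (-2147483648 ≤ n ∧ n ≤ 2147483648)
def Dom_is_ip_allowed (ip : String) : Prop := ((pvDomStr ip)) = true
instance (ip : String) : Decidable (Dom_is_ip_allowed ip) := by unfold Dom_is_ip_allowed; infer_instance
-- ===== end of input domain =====

-- B replaces A's per-call loop over 21 subnet strings by one regex match and one
-- closed-form integer range test (the 20 /16 blocks 10.100–10.119 are contiguous);
-- objective: simpler.

-- ===== PORT A =====
-- A calls ipaddress.ip_address(ip); ported by hand as pvParseIPv4? (CPython's strict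
-- IPv4 dotted-quad grammar: split on '.', four octets, each 1–3 ASCII digits, no
-- leading zero, value ≤ 255) — exact for IPv4. A valid IPv6 address parses to none
-- here, which is output-faithful: A's IPv4-subnet membership tests are all False on
-- an IPv6 address, so A returns False on it exactly as on a ValueError.
def pvOctet? (cs : List Char) : Option Nat :=
  if cs = [] then none
  else if cs.length > 3 then none
  else if ¬ cs.all (fun c => c.isDigit) then none
  else if cs.length > 1 ∧ cs.headI = '0' then none
  else
    let v := cs.foldl (fun a c => a * 10 + (c.toNat - 48)) 0
    if v ≤ 255 then some v else none

def pvParseIPv4? (ip : String) : Option Nat :=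
  match PySem.Chars.splitOn ip.toList ['.'] with
  | [a, b, c, d] =>
    match pvOctet? a, pvOctet? b, pvOctet? c, pvOctet? d with
    | some x, some y, some z, some w => some (((x * 256 + y) * 256 + z) * 256 + w)
    | _, _, _, _ => none
  | _ => none

def ALLOWED_SUBNETS : List String :=
  ["10.100.0.0/16", "10.101.0.0/16", "10.102.0.0/16", "10.103.0.0/16", "10.104.0.0/16",
   "10.105.0.0/16", "10.106.0.0/16", "10.107.0.0/16", "10.108.0.0/16", "10.109.0.0/16",
   "10.110.0.0/16", "10.111.0.0/16", "10.112.0.0/16", "10.113.0.0/16", "10.114.0.0/16",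
   "10.115.0.0/16", "10.116.0.0/16", "10.117.0.0/16", "10.118.0.0/16", "10.119.0.0/16",
   "127.0.0.1/32"]

-- int(prefix_str): nonempty all-digit string to Nat (enough for the constant prefixes)
def pvPrefix? (cs : List Char) : Option Nat :=
  if cs ≠ [] ∧ cs.all (fun c => c.isDigit) then
    some (cs.foldl (fun a c => a * 10 + (c.toNat - 48)) 0)
  else none

-- ipaddress.ip_network on a "a.b.c.d/p" string: network address and prefix length
def pvParseNet? (s : String) : Option (Nat × Nat) :=
  match PySem.Chars.splitOn s.toList ['/'] with
  | [addr, p] =>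
    match pvParseIPv4? (String.ofList addr), pvPrefix? p with
    | some net, some pl => if pl ≤ 32 then some (net, pl) else none
    | _, _ => none
  | _ => none

-- `ip_obj in subnet`: the top `pl` bits of ip and network address coincide
def pvInSubnet (n : Nat) (s : String) : Bool :=
  match pvParseNet? s with
  | some (net, pl) => n / 2 ^ (32 - pl) == net / 2 ^ (32 - pl)
  | none => false

def is_ip_allowed (ip : String) : Bool :=
  match pvParseIPv4? ip with
  | some n => ALLOWED_SUBNETS.any (fun subnet_str => pvInSubnet n subnet_str)
  | none => false      -- ValueError (invalid) → False; a valid IPv6 also yields False via the loop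

-- ===== PORT B =====
-- B fullmatches the regex  O\.O\.O\.O  with O = (25[0-5]|2[0-4][0-9]|1[0-9][0-9]|[1-9]?[0-9]).
-- Ported by hand, exactly: the octet alternatives consume only digits and the separators
-- are literal dots, so a full match cannot span a dot — the regex fullmatches iff the
-- split on '.' yields exactly four segments, each fully matching the alternation.
-- pvReOctet is that alternation, alternative by alternative (grouped by segment length,
-- which each alternative fixes).
def pvReOctet (cs : List Char) : Bool :=
  match cs with
  | [c₁, c₂, c₃] =>
    (c₁ = '2' && c₂ = '5' && ('0' ≤ c₃ && c₃ ≤ '5')) ||                        -- 25[0-5]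
    (c₁ = '2' && ('0' ≤ c₂ && c₂ ≤ '4') && ('0' ≤ c₃ && c₃ ≤ '9')) ||          -- 2[0-4][0-9]
    (c₁ = '1' && ('0' ≤ c₂ && c₂ ≤ '9') && ('0' ≤ c₃ && c₃ ≤ '9'))             -- 1[0-9][0-9]
  | [c₁, c₂] => ('1' ≤ c₁ && c₁ ≤ '9') && ('0' ≤ c₂ && c₂ ≤ '9')               -- [1-9][0-9]
  | [c₁] => '0' ≤ c₁ && c₁ ≤ '9'                                               -- [0-9]
  | _ => false

-- int(g) on a matched (all-digit) group
def pvGroupInt (cs : List Char) : Nat :=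
  cs.foldl (fun a c => a * 10 + (c.toNat - 48)) 0

def is_ip_allowed_alt (ip : String) : Bool :=
  match PySem.Chars.splitOn ip.toList ['.'] with
  | [ga, gb, gc, gd] =>
    if pvReOctet ga && pvReOctet gb && pvReOctet gc && pvReOctet gd then
      let n := ((pvGroupInt ga * 256 + pvGroupInt gb) * 256 + pvGroupInt gc) * 256 + pvGroupInt gd
      -- the 20 /16 subnets 10.100-10.119 are one contiguous block, plus localhost
      (0x0A640000 ≤ n && n ≤ 0x0A77FFFF) || n == 0x7F000001
    else false
  | _ => false      -- no fullmatch → False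

-- ===== PRECONDITION & SPEC =====
def Spec_is_ip_allowed (ip : String) (out : Bool) : Prop := out = is_ip_allowed_alt ip
instance (ip : String) (out : Bool) : Decidable (Spec_is_ip_allowed ip out) := by unfold Spec_is_ip_allowed; infer_instance

-- ===== CLAIM (what is proved, stated in full; the proofs are below) =====
def Claim_equal_is_ip_allowed : Prop := ∀ (ip : String), Dom_is_ip_allowed ip → Spec_is_ip_allowed ip (is_ip_allowed ip)

-- ===== LEMMAS AND PROOFS =====

theorem pvCharLe (a c : Char) : (a ≤ c) ↔ (a.toNat ≤ c.toNat) := by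
  rw [Char.le_def, UInt32.le_iff_toNat_le]; rfl

theorem pvCharEq (c a : Char) : (c = a) ↔ c.toNat = a.toNat := by
  constructor
  · intro h; subst h; rfl
  · intro h; exact Char.ext (UInt32.toNat_inj.mp h)

theorem pvU48 : (48 : UInt32).toNat = 48 := rfl

theorem pvU57 : (57 : UInt32).toNat = 57 := rfl

-- A's octet grammar and B's regex alternation accept the same strings, with the same value.
theorem pvOctet_bridge (cs : List Char) :
    pvOctet? cs = if pvReOctet cs then some (pvGroupInt cs) else none := by
  match cs with
  | [] => rfl
  | [a] =>
    simp [pvOctet?, pvReOctet, pvGroupInt, Char.isDigit, pvCharLe, pvCharEq]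
    split_ifs <;>
      (try simp_all only [Classical.not_imp, UInt32.le_iff_toNat_le, UInt32.lt_iff_toNat_lt,
        UInt32.not_lt, UInt32.not_le, Char.toNat_val, not_and, not_le, not_lt,
        Bool.and_eq_true, Bool.or_eq_true, decide_eq_true_eq, pvU48, pvU57, true_implies,
        Option.some.injEq, and_true, true_and, not_true, imp_false]) <;>
      first | rfl | omega
  | [a, b] =>
    simp [pvOctet?, pvReOctet, pvGroupInt, Char.isDigit, pvCharLe, pvCharEq]
    split_ifs <;>
      (try simp_all only [Classical.not_imp, UInt32.le_iff_toNat_le, UInt32.lt_iff_toNat_lt,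
        UInt32.not_lt, UInt32.not_le, Char.toNat_val, not_and, not_le, not_lt,
        Bool.and_eq_true, Bool.or_eq_true, decide_eq_true_eq, pvU48, pvU57, true_implies,
        Option.some.injEq, and_true, true_and, not_true, imp_false]) <;>
      first | rfl | omega
  | [a, b, c] =>
    simp [pvOctet?, pvReOctet, pvGroupInt, Char.isDigit, pvCharLe, pvCharEq]
    split_ifs <;>
      (try simp_all only [Classical.not_imp, UInt32.le_iff_toNat_le, UInt32.lt_iff_toNat_lt,
        UInt32.not_lt, UInt32.not_le, Char.toNat_val, not_and, not_le, not_lt,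
        Bool.and_eq_true, Bool.or_eq_true, decide_eq_true_eq, pvU48, pvU57, true_implies,
        Option.some.injEq, and_true, true_and, not_true, imp_false]) <;>
      first | rfl | omega
  | a :: b :: c :: d :: tl =>
    simp [pvOctet?, pvReOctet]

-- The subnet loop, on any integer n, is the closed-form range test.
theorem pvLoop_eq (n : Nat) :
    ALLOWED_SUBNETS.any (fun subnet_str => pvInSubnet n subnet_str) =
      ((0x0A640000 ≤ n && n ≤ 0x0A77FFFF) || n == 0x7F000001) := by
  have h : ∀ s : String, ∀ net pl : Nat, pvParseNet? s = some (net, pl) →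
      pvInSubnet n s = (n / 2 ^ (32 - pl) == net / 2 ^ (32 - pl)) := by
    intro s net pl hs
    simp [pvInSubnet, hs]
  rw [Bool.eq_iff_iff]
  simp only [ALLOWED_SUBNETS, List.any_cons, List.any_nil,
    h _ _ _ (show pvParseNet? "10.100.0.0/16" = some (0x0A640000, 16) by decide),
    h _ _ _ (show pvParseNet? "10.101.0.0/16" = some (0x0A650000, 16) by decide),
    h _ _ _ (show pvParseNet? "10.102.0.0/16" = some (0x0A660000, 16) by decide),
    h _ _ _ (show pvParseNet? "10.103.0.0/16" = some (0x0A670000, 16) by decide),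
    h _ _ _ (show pvParseNet? "10.104.0.0/16" = some (0x0A680000, 16) by decide),
    h _ _ _ (show pvParseNet? "10.105.0.0/16" = some (0x0A690000, 16) by decide),
    h _ _ _ (show pvParseNet? "10.106.0.0/16" = some (0x0A6A0000, 16) by decide),
    h _ _ _ (show pvParseNet? "10.107.0.0/16" = some (0x0A6B0000, 16) by decide),
    h _ _ _ (show pvParseNet? "10.108.0.0/16" = some (0x0A6C0000, 16) by decide),
    h _ _ _ (show pvParseNet? "10.109.0.0/16" = some (0x0A6D0000, 16) by decide),
    h _ _ _ (show pvParseNet? "10.110.0.0/16" = some (0x0A6E0000, 16) by decide),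
    h _ _ _ (show pvParseNet? "10.111.0.0/16" = some (0x0A6F0000, 16) by decide),
    h _ _ _ (show pvParseNet? "10.112.0.0/16" = some (0x0A700000, 16) by decide),
    h _ _ _ (show pvParseNet? "10.113.0.0/16" = some (0x0A710000, 16) by decide),
    h _ _ _ (show pvParseNet? "10.114.0.0/16" = some (0x0A720000, 16) by decide),
    h _ _ _ (show pvParseNet? "10.115.0.0/16" = some (0x0A730000, 16) by decide),
    h _ _ _ (show pvParseNet? "10.116.0.0/16" = some (0x0A740000, 16) by decide),
    h _ _ _ (show pvParseNet? "10.117.0.0/16" = some (0x0A750000, 16) by decide),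
    h _ _ _ (show pvParseNet? "10.118.0.0/16" = some (0x0A760000, 16) by decide),
    h _ _ _ (show pvParseNet? "10.119.0.0/16" = some (0x0A770000, 16) by decide),
    h _ _ _ (show pvParseNet? "127.0.0.1/32" = some (0x7F000001, 32) by decide),
    Bool.or_eq_true, beq_iff_eq, Bool.and_eq_true, decide_eq_true_eq]
  norm_num
  omega

-- ===== VERDICT (by name: the statement is the Claim_ definition above) =====
theorem is_ip_allowed_spec : Claim_equal_is_ip_allowed := by
  intro ip _
  unfold Spec_is_ip_allowed is_ip_allowed is_ip_allowed_alt
  rcases h : PySem.Chars.splitOn ip.toList ['.'] with _ | ⟨a, _ | ⟨b, _ | ⟨c, _ | ⟨d, _ | e⟩⟩⟩⟩ <;>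
    simp only [pvParseIPv4?, h] <;> try rfl
  rw [pvOctet_bridge a, pvOctet_bridge b, pvOctet_bridge c, pvOctet_bridge d]
  by_cases ha : pvReOctet a <;> by_cases hb : pvReOctet b <;>
    by_cases hc : pvReOctet c <;> by_cases hd : pvReOctet d <;>
    simp only [ha, hb, hc, hd, if_true, if_false, Bool.true_and, Bool.false_and,
      Bool.and_true, Bool.and_false, Bool.and_self] <;>
    try rfl
  exact pvLoop_eq _
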